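-- pv_equiv track=rewrite | github.com/drakempham/Technical | algorithm + contest/pattern/think.py | findValidElements
-- ===== SOURCE A (Python) =====
-- from typing import List
--
-- def findValidElements(nums: List[int]) -> List[int]:
--     n = len(nums)
--     if n <= 2:
--         return nums
--
--     is_valid = [False] * n
--     is_valid[0] = is_valid[n-1] = True
--     curr_max = nums[0]
--     for i in range(1, n-1):
--         if nums[i] > curr_max:
--             is_valid[i] = True
--             curr_max = nums[i]
--     curr_max = nums[n-1]
--     for i in range(n-2, 0, -1):
--         if nums[i] > curr_max:  # van phai quet de cap nhat max
--             is_valid[i] = True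
--             curr_max = nums[i]
--
--     return [nums[i] for i in range(n) if is_valid[i]]
-- ===== SOURCE B (Python) =====
-- from typing import List
--
-- def findValidElements(nums: List[int]) -> List[int]:
--     return [v for i, v in enumerate(nums)
--             if all(x < v for x in nums[:i]) or all(x < v for x in nums[i+1:])]
-- ===== Notes on version B (the rewrite author's own statement) =====
-- stated objective: simpler
-- what changed: B replaces A's boolean marker array, explicit n<=2 branch and two running-max passes with a single comprehension that keeps an element when all earlier or all later elements are smaller.
import Mathlib
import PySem

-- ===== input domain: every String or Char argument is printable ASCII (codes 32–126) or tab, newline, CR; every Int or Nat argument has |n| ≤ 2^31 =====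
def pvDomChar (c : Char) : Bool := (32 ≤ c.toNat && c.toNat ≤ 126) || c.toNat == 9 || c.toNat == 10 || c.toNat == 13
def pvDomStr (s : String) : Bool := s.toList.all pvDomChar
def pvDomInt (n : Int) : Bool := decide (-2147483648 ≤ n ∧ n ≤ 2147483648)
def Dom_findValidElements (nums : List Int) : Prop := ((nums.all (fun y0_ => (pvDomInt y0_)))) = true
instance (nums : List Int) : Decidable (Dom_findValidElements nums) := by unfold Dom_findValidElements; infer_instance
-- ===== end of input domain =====

-- B keeps elements greater than all elements to one side via one quadratic comprehension,
-- replacing A's marker array and two running-max passes; objective: simpler (not faster).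

-- ===== PORT A =====
-- body of both of A's loops (identical in the Python source): update (is_valid, curr_max) at index i
def pvStep (nums : List Int) (s : List Bool × Int) (i : Int) : List Bool × Int :=
  if PySem.List.pyGetD nums i 0 > s.2 then (s.1.set i.toNat true, PySem.List.pyGetD nums i 0) else s

def findValidElements (nums : List Int) : List Int :=
  let n := nums.length
  if n ≤ 2 then nums else
  -- is_valid = [False]*n; is_valid[0] = is_valid[n-1] = True  (indices 0, n-1 are in range: n ≥ 3)
  let v0 := ((List.replicate n false).set 0 true).set (n-1) true
  let s1 := (PySem.List.pyRange 1 ((n : Int) - 1) 1).foldl (pvStep nums) (v0, PySem.List.pyGetD nums 0 0)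
  let s2 := (PySem.List.pyRange ((n : Int) - 2) 0 (-1)).foldl (pvStep nums) (s1.1, PySem.List.pyGetD nums ((n : Int) - 1) 0)
  ((PySem.List.pyRange 0 (n : Int) 1).filter (fun i => PySem.List.pyGetD s2.1 i false)).map
    (fun i => PySem.List.pyGetD nums i 0)

-- ===== PORT B =====
def findValidElements_alt (nums : List Int) : List Int :=
  ((PySem.List.enumerate nums 0).filter (fun p =>
      (PySem.List.slice nums none (some p.1)).all (fun x => decide (x < p.2)) ||
      (PySem.List.slice nums (some (p.1 + 1)) none).all (fun x => decide (x < p.2)))).map (fun p => p.2)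

-- ===== PRECONDITION & SPEC =====
def Spec_findValidElements (nums : List Int) (out : List Int) : Prop := out = findValidElements_alt nums
instance (nums : List Int) (out : List Int) : Decidable (Spec_findValidElements nums out) := by unfold Spec_findValidElements; infer_instance

-- ===== CLAIM (what is proved, stated in full; the proofs are below) =====
def Claim_equal_findValidElements : Prop := ∀ (nums : List Int), Dom_findValidElements nums → Spec_findValidElements nums (findValidElements nums)

-- ===== LEMMAS AND PROOFS =====

-- element j beats every earlier (pref) / every later (suff) element
def pvPref (nums : List Int) (j : Nat) : Bool := (nums.take j).all (fun y => decide (y < nums.getD j 0))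
def pvSuff (nums : List Int) (j : Nat) : Bool := (nums.drop (j+1)).all (fun y => decide (y < nums.getD j 0))
def pvOk (nums : List Int) (j : Nat) : Bool := pvPref nums j || pvSuff nums j
def pvGold (nums : List Int) : List Int :=
  ((List.range nums.length).filter (pvOk nums)).map (fun j => nums.getD j 0)

lemma getD_set_true (v : List Bool) (k j : Nat) (hk : k < v.length) :
    (v.set k true).getD j false = (v.getD j false || decide (j = k)) := by
  by_cases h : j = k
  · subst h
    simp [List.getD, List.getElem?_set, hk]
  · simp [List.getD, List.getElem?_set, Ne.symm h, h]

lemma length_foldl_pvStep (nums : List Int) (l : List Int) :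
    ∀ (v : List Bool) (c : Int), ((l.foldl (pvStep nums) (v, c)).1).length = v.length := by
  induction l with
  | nil => intro v c; rfl
  | cons i t ih =>
    intro v c
    by_cases h : PySem.List.pyGetD nums i 0 > c
    · simpa [pvStep, h] using ih (v.set i.toNat true) (PySem.List.pyGetD nums i 0)
    · simpa [pvStep, h] using ih v c

lemma pv_merge_mark {k m j : Nat} {P : Prop} (hPk : j = k → P) :
    (j = k ∨ (k + 1 ≤ j ∧ j < k + 1 + m ∧ P)) ↔ (k ≤ j ∧ j < k + (m + 1) ∧ P) := by
  constructor
  · rintro (rfl | ⟨h1, h2, h3⟩)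
    · exact ⟨le_refl _, by omega, hPk rfl⟩
    · exact ⟨by omega, by omega, h3⟩
  · rintro ⟨h1, h2, h3⟩
    by_cases hj : j = k
    · exact Or.inl hj
    · exact Or.inr ⟨by omega, by omega, h3⟩

lemma pv_merge_skip {k m j : Nat} {P : Prop} (hnk : j = k → ¬P) :
    (k + 1 ≤ j ∧ j < k + 1 + m ∧ P) ↔ (k ≤ j ∧ j < k + (m + 1) ∧ P) := by
  constructor
  · rintro ⟨h1, h2, h3⟩; exact ⟨by omega, by omega, h3⟩
  · rintro ⟨h1, h2, h3⟩
    by_cases hj : j = k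
    · exact absurd h3 (hnk hj)
    · exact ⟨by omega, by omega, h3⟩

lemma pv_bmerge_mark {k j : Nat} {P : Prop} (hPk : j = k + 1 → P) :
    (j = k + 1 ∨ (1 ≤ j ∧ j ≤ k ∧ P)) ↔ (1 ≤ j ∧ j ≤ k + 1 ∧ P) := by
  constructor
  · rintro (rfl | ⟨h1, h2, h3⟩)
    · exact ⟨by omega, by omega, hPk rfl⟩
    · exact ⟨by omega, by omega, h3⟩
  · rintro ⟨h1, h2, h3⟩
    by_cases hj : j = k + 1
    · exact Or.inl hj
    · exact Or.inr ⟨by omega, by omega, h3⟩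

lemma pv_bmerge_skip {k j : Nat} {P : Prop} (hnk : j = k + 1 → ¬P) :
    (1 ≤ j ∧ j ≤ k ∧ P) ↔ (1 ≤ j ∧ j ≤ k + 1 ∧ P) := by
  constructor
  · rintro ⟨h1, h2, h3⟩; exact ⟨by omega, by omega, h3⟩
  · rintro ⟨h1, h2, h3⟩
    by_cases hj : j = k + 1
    · exact absurd h3 (hnk hj)
    · exact ⟨by omega, by omega, h3⟩

lemma fwd_pass (nums : List Int) :
    ∀ (m k : Nat) (v : List Bool) (c : Int),
    v.length = nums.length → k + m ≤ nums.length →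
    (∀ x : Int, c < x ↔ (nums.take k).all (fun y => decide (y < x)) = true) →
    ∀ j : Nat,
      ((PySem.List.pyRange (k : Int) ((k : Int) + (m : Int)) 1).foldl (pvStep nums) (v, c)).1.getD j false
        = (v.getD j false || decide (k ≤ j ∧ j < k + m ∧ pvPref nums j = true)) := by
  intro m
  induction m with
  | zero =>
    intro k v c hv hkm hc j
    rw [PySem.List.pyRange_one_eq_nil (by omega)]
    have h : decide (k ≤ j ∧ j < k + 0 ∧ pvPref nums j = true) = false := by
      simp only [decide_eq_false_iff_not]; rintro ⟨h1, h2, -⟩; omega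
    simp only [List.foldl_nil, h, Bool.or_false]
  | succ m ih =>
    intro k v c hv hkm hc j
    have hkn : k < nums.length := by omega
    rw [PySem.List.pyRange_one_cons (by push_cast; omega)]
    have hrange : ((k : Int) + 1) = ((k + 1 : Nat) : Int) := by push_cast; ring
    have hend : ((k : Int) + ((m + 1 : Nat) : Int)) = ((k + 1 : Nat) : Int) + (m : Nat) := by push_cast; ring
    have hx : PySem.List.pyGetD nums (k : Int) 0 = nums.getD k 0 := by
      rw [PySem.List.pyGetD_natCast]
    have hcondiff : (PySem.List.pyGetD nums (k : Int) 0 > c) ↔ pvPref nums k = true := by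
      rw [hx, pvPref]; exact hc _
    have htake : nums.take (k + 1) = nums.take k ++ [nums.getD k 0] := by
      rw [List.take_add_one]
      simp [List.getD, List.getElem?_eq_getElem hkn]
    by_cases hcond : PySem.List.pyGetD nums (k : Int) 0 > c
    · -- nums[k] > curr_max: mark k, new max nums[k]
      have hstep : pvStep nums (v, c) (k : Int) = (v.set k true, nums.getD k 0) := by
        unfold pvStep; rw [if_pos hcond, hx]; simp
      have hc' : ∀ x : Int, nums.getD k 0 < x ↔ (nums.take (k+1)).all (fun y => decide (y < x)) = true := by
        intro x
        rw [htake]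
        simp only [List.all_append, List.all_cons, List.all_nil, Bool.and_eq_true, decide_eq_true_eq]
        constructor
        · intro hlt
          refine ⟨(hc x).1 (lt_trans ?_ hlt), hlt, trivial⟩
          rw [hx] at hcond; exact hcond
        · rintro ⟨-, hlt, -⟩; exact hlt
      have hih := ih (k+1) (v.set k true) (nums.getD k 0)
        (by simpa using hv) (by omega) hc' j
      rw [List.foldl_cons, hstep, hrange, hend, hih,
        getD_set_true v k j (by omega), Bool.or_assoc, ← Bool.decide_or]
      congr 1
      rw [decide_eq_decide]
      exact pv_merge_mark (by rintro rfl; exact hcondiff.1 hcond)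
    · -- nums[k] ≤ curr_max: state unchanged, curr_max is still the prefix max
      have hstep : pvStep nums (v, c) (k : Int) = (v, c) := by
        unfold pvStep; rw [if_neg hcond]
      have hc' : ∀ x : Int, c < x ↔ (nums.take (k+1)).all (fun y => decide (y < x)) = true := by
        intro x
        rw [htake]
        simp only [List.all_append, List.all_cons, List.all_nil, Bool.and_eq_true, decide_eq_true_eq]
        constructor
        · intro hlt
          refine ⟨(hc x).1 hlt, ?_, trivial⟩
          rw [hx] at hcond
          push_neg at hcond
          exact lt_of_le_of_lt hcond hlt
        · rintro ⟨hall, -, -⟩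
          exact (hc x).2 hall
      have hih := ih (k+1) v c hv (by omega) hc' j
      rw [List.foldl_cons, hstep, hrange, hend, hih]
      congr 1
      rw [decide_eq_decide]
      exact pv_merge_skip (by rintro rfl hp; exact hcond (hcondiff.2 hp))

lemma bwd_pass (nums : List Int) :
    ∀ (k : Nat) (v : List Bool) (c : Int),
    v.length = nums.length → k < nums.length →
    (∀ x : Int, c < x ↔ (nums.drop (k+1)).all (fun y => decide (y < x)) = true) →
    ∀ j : Nat,
      ((PySem.List.pyRange (k : Int) 0 (-1)).foldl (pvStep nums) (v, c)).1.getD j false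
        = (v.getD j false || decide (1 ≤ j ∧ j ≤ k ∧ pvSuff nums j = true)) := by
  intro k
  induction k with
  | zero =>
    intro v c hv hk hc j
    rw [PySem.List.pyRange_neg_one_eq_nil (by omega)]
    have h : decide (1 ≤ j ∧ j ≤ 0 ∧ pvSuff nums j = true) = false := by
      simp only [decide_eq_false_iff_not]; rintro ⟨h1, h2, -⟩; omega
    simp only [List.foldl_nil, h, Bool.or_false]
  | succ k ih =>
    intro v c hv hk hc j
    rw [PySem.List.pyRange_neg_one_cons (by push_cast; omega)]
    have hrange : ((k + 1 : Nat) : Int) - 1 = (k : Int) := by push_cast; ring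
    have hx : PySem.List.pyGetD nums ((k + 1 : Nat) : Int) 0 = nums.getD (k+1) 0 := by
      rw [PySem.List.pyGetD_natCast]
    have hcondiff : (PySem.List.pyGetD nums ((k+1 : Nat) : Int) 0 > c) ↔ pvSuff nums (k+1) = true := by
      rw [hx, pvSuff]; exact hc _
    have hdrop : nums.drop (k + 1) = nums.getD (k+1) 0 :: nums.drop (k + 2) := by
      rw [List.drop_eq_getElem_cons hk]
      simp [List.getD, List.getElem?_eq_getElem hk]
    by_cases hcond : PySem.List.pyGetD nums ((k+1 : Nat) : Int) 0 > c
    · have hstep : pvStep nums (v, c) ((k+1 : Nat) : Int) = (v.set (k+1) true, nums.getD (k+1) 0) := by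
        unfold pvStep; rw [if_pos hcond, hx]; simp
      have hc' : ∀ x : Int, nums.getD (k+1) 0 < x ↔ (nums.drop (k+1)).all (fun y => decide (y < x)) = true := by
        intro x
        rw [hdrop]
        simp only [List.all_cons, Bool.and_eq_true, decide_eq_true_eq]
        constructor
        · intro hlt
          refine ⟨hlt, (hc x).1 (lt_trans ?_ hlt)⟩
          rw [hx] at hcond; exact hcond
        · rintro ⟨hlt, -⟩; exact hlt
      have hih := ih (v.set (k+1) true) (nums.getD (k+1) 0)
        (by simpa using hv) (by omega) hc' j
      rw [List.foldl_cons, hstep, hrange, hih, getD_set_true v (k+1) j (by omega),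
        Bool.or_assoc, ← Bool.decide_or]
      congr 1
      rw [decide_eq_decide]
      exact pv_bmerge_mark (by rintro rfl; exact hcondiff.1 hcond)
    · have hstep : pvStep nums (v, c) ((k+1 : Nat) : Int) = (v, c) := by
        unfold pvStep; rw [if_neg hcond]
      have hc' : ∀ x : Int, c < x ↔ (nums.drop (k+1)).all (fun y => decide (y < x)) = true := by
        intro x
        rw [hdrop]
        simp only [List.all_cons, Bool.and_eq_true, decide_eq_true_eq]
        constructor
        · intro hlt
          refine ⟨?_, (hc x).1 hlt⟩
          rw [hx] at hcond
          push_neg at hcond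
          exact lt_of_le_of_lt hcond hlt
        · rintro ⟨-, hall⟩
          exact (hc x).2 hall
      have hih := ih v c hv (by omega) hc' j
      rw [List.foldl_cons, hstep, hrange, hih]
      congr 1
      rw [decide_eq_decide]
      exact pv_bmerge_skip (by rintro rfl hp; exact hcond (hcondiff.2 hp))

lemma b_cond_eq (nums : List Int) (j : Nat) :
    ((PySem.List.slice nums none (some ((j : Nat) : Int))).all (fun x => decide (x < PySem.List.pyGetD nums ((j : Nat) : Int) 0)) ||
     (PySem.List.slice nums (some (((j : Nat) : Int) + 1)) none).all (fun x => decide (x < PySem.List.pyGetD nums ((j : Nat) : Int) 0)))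
      = pvOk nums j := by
  have hcast : (((j : Nat) : Int) + 1) = (((j + 1 : Nat)) : Int) := by push_cast; ring
  rw [hcast, PySem.List.slice_to_natCast, PySem.List.slice_from_natCast, PySem.List.pyGetD_natCast]
  rfl

lemma b_eq_gold (nums : List Int) : findValidElements_alt nums = pvGold nums := by
  unfold findValidElements_alt pvGold
  rw [PySem.List.enumerate_eq_map_pyRange nums 0]
  rw [show PySem.List.len nums = ((nums.length : Nat) : Int) from by simp]
  rw [PySem.List.pyRange_zero_nat, List.map_map, List.filter_map, List.map_map]
  rw [List.filter_congr (fun j _ => by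
    show (((fun p : Int × Int =>
        ((PySem.List.slice nums none (some p.1)).all (fun x => decide (x < p.2)) ||
         (PySem.List.slice nums (some (p.1 + 1)) none).all (fun x => decide (x < p.2)))) ∘ _) j) = pvOk nums j
    exact b_cond_eq nums j)]
  exact List.map_congr_left (fun j _ => by
    show PySem.List.pyGetD nums ((j : Nat) : Int) 0 = nums.getD j 0
    rw [PySem.List.pyGetD_natCast])

lemma gold_small (nums : List Int) (h : nums.length ≤ 2) : pvGold nums = nums := by
  match nums with
  | [] => rfl
  | [a] => simp [pvGold, pvOk, pvPref, pvSuff, List.range_succ]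
  | [a, b] => simp [pvGold, pvOk, pvPref, pvSuff, List.range_succ, List.getD]
  | a :: b :: c :: t => simp at h

lemma cond_merge (nums : List Int) (j : Nat) (h3 : 3 ≤ nums.length) (hj : j < nums.length) :
    (((decide (j = 0) || decide (j = nums.length - 1)) ||
        decide (1 ≤ j ∧ j < 1 + (nums.length - 2) ∧ pvPref nums j = true)) ||
      decide (1 ≤ j ∧ j ≤ nums.length - 2 ∧ pvSuff nums j = true)) = pvOk nums j := by
  have hb : pvOk nums j = decide (pvPref nums j = true ∨ pvSuff nums j = true) := by
    by_cases h1 : pvPref nums j = true <;> by_cases h2 : pvSuff nums j = true <;>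
      simp [pvOk, h1, h2]
  rw [hb]
  simp only [← Bool.decide_or]
  rw [decide_eq_decide]
  constructor
  · rintro (((rfl | rfl) | ⟨-, -, hp⟩) | ⟨-, -, hs⟩)
    · left; simp [pvPref]
    · right
      unfold pvSuff
      rw [show nums.length - 1 + 1 = nums.length from by omega]
      simp [List.drop_length]
    · exact Or.inl hp
    · exact Or.inr hs
  · rintro (hp | hs)
    · by_cases hj0 : j = 0
      · exact Or.inl (Or.inl (Or.inl hj0))
      · by_cases hjn : j = nums.length - 1
        · exact Or.inl (Or.inl (Or.inr hjn))
        · exact Or.inl (Or.inr ⟨by omega, by omega, hp⟩)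
    · by_cases hj0 : j = 0
      · exact Or.inl (Or.inl (Or.inl hj0))
      · by_cases hjn : j = nums.length - 1
        · exact Or.inl (Or.inl (Or.inr hjn))
        · exact Or.inr ⟨by omega, by omega, hs⟩

lemma a_eq_gold (nums : List Int) : findValidElements nums = pvGold nums := by
  by_cases hn : nums.length ≤ 2
  · rw [findValidElements]
    simp only [hn, if_true]
    exact (gold_small nums hn).symm
  · push_neg at hn
    have h3 : 3 ≤ nums.length := hn
    rw [findValidElements]
    simp only [if_neg (by omega : ¬ nums.length ≤ 2)]
    rw [show PySem.List.pyRange 1 ((nums.length : Int) - 1) 1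
          = PySem.List.pyRange (((1 : Nat) : Int)) (((1 : Nat) : Int) + ((nums.length - 2 : Nat) : Int)) 1 from by
        rw [show ((nums.length : Int) - 1) = (((1 : Nat) : Int) + ((nums.length - 2 : Nat) : Int)) from by omega]
        norm_num]
    rw [show ((nums.length : Int) - 2) = ((nums.length - 2 : Nat) : Int) from by omega]
    rw [show ((nums.length : Int) - 1) = ((nums.length - 1 : Nat) : Int) from by omega]
    -- initial validity array
    have hv0len : (((List.replicate nums.length false).set 0 true).set (nums.length - 1) true).length
        = nums.length := by simp
    have hv0 : ∀ j : Nat,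
        (((List.replicate nums.length false).set 0 true).set (nums.length - 1) true).getD j false
          = (decide (j = 0) || decide (j = nums.length - 1)) := by
      intro j
      rw [getD_set_true _ _ _ (by simp; omega), getD_set_true _ _ _ (by simp; omega)]
      have hrep : (List.replicate nums.length false).getD j false = false := by
        by_cases h : j < nums.length <;> simp [List.getD, List.getElem?_replicate, h]
      rw [hrep, Bool.false_or]
    -- first loop: curr_max is the running prefix max
    have hc1 : ∀ x : Int, PySem.List.pyGetD nums 0 0 < x ↔
        ((nums.take 1).all (fun y => decide (y < x))) = true := by
      intro x
      have htake1 : nums.take 1 = [nums.getD 0 0] := by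
        rcases nums with _ | ⟨a, t⟩
        · simp at h3
        · simp [List.getD]
      rw [PySem.List.pyGetD_zero, htake1]
      simp
    have hfwd := fwd_pass nums (nums.length - 2) 1
      (((List.replicate nums.length false).set 0 true).set (nums.length - 1) true)
      (PySem.List.pyGetD nums 0 0) hv0len (by omega) hc1
    have hlen1 := length_foldl_pvStep nums
      (PySem.List.pyRange (((1 : Nat) : Int)) (((1 : Nat) : Int) + ((nums.length - 2 : Nat) : Int)) 1)
      (((List.replicate nums.length false).set 0 true).set (nums.length - 1) true)
      (PySem.List.pyGetD nums 0 0)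
    -- second loop: curr_max is the running suffix max
    have hc2 : ∀ x : Int, PySem.List.pyGetD nums ((nums.length - 1 : Nat) : Int) 0 < x ↔
        ((nums.drop (nums.length - 2 + 1)).all (fun y => decide (y < x))) = true := by
      intro x
      have hg : PySem.List.pyGetD nums ((nums.length - 1 : Nat) : Int) 0 = nums.getD (nums.length - 1) 0 := by
        rw [PySem.List.pyGetD_natCast]
      have hdrop : nums.drop (nums.length - 2 + 1) = [nums.getD (nums.length - 1) 0] := by
        rw [show nums.length - 2 + 1 = nums.length - 1 from by omega]
        rw [List.drop_eq_getElem_cons (by omega : nums.length - 1 < nums.length)]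
        rw [show nums.length - 1 + 1 = nums.length from by omega, List.drop_length]
        simp [List.getD, List.getElem?_eq_getElem (by omega : nums.length - 1 < nums.length)]
      rw [hg, hdrop]
      simp
    have hbwd := bwd_pass nums (nums.length - 2)
      ((PySem.List.pyRange (((1 : Nat) : Int)) (((1 : Nat) : Int) + ((nums.length - 2 : Nat) : Int)) 1).foldl
          (pvStep nums)
          ((((List.replicate nums.length false).set 0 true).set (nums.length - 1) true),
            PySem.List.pyGetD nums 0 0)).1
      (PySem.List.pyGetD nums ((nums.length - 1 : Nat) : Int) 0)
      (by rw [hlen1]; exact hv0len) (by omega) hc2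
    -- final comprehension
    unfold pvGold
    rw [PySem.List.pyRange_zero_nat, List.filter_map, List.map_map]
    rw [List.filter_congr (fun j hjm => by
      have hj : j < nums.length := List.mem_range.mp hjm
      show PySem.List.pyGetD _ ((j : Nat) : Int) false = pvOk nums j
      rw [PySem.List.pyGetD_natCast, hbwd j, hfwd j, hv0 j]
      exact cond_merge nums j h3 hj)]
    exact List.map_congr_left (fun j _ => by
      show PySem.List.pyGetD nums ((j : Nat) : Int) 0 = nums.getD j 0
      rw [PySem.List.pyGetD_natCast])

-- ===== VERDICT (by name: the statement is the Claim_ definition above) =====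
theorem findValidElements_spec : Claim_equal_findValidElements := by
  intro nums _
  show _ = _
  rw [a_eq_gold, b_eq_gold]
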